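-- pv_equiv track=rewrite | github.com/CodesByEtemesi/Phase3_Wk1_Code_Challenge | sum.py | solution
-- ===== SOURCE A (Python) =====
-- def digit_sum(num):
--     return sum(int(digit) for digit in str(num))
--
-- def solution(A):
--     # Dictionary to store the maximum sum for each digit sum
--     max_sums = {}
--
--     for num in A:
--
--         d_sum = digit_sum(num)
--         max_sums[d_sum] = max(max_sums.get(d_sum, -1), num)
--
--     max_pair_sum = 1
--     for i in range(1, 100):
--         if i in max_sums:
--             for j in range(i + 1, 100):
--                 if j in max_sums:
--                     max_pair_sum = max(max_pair_sum, max_sums[i] + max_sums[j])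
--
--     return max_pair_sum if max_pair_sum != 1 else -1
-- ===== SOURCE B (Python) =====
-- def digit_sum(num):
--     return sum(int(digit) for digit in str(num))
--
-- def solution(A):
--     # max value per digit sum (same first pass as before)
--     max_sums = {}
--     for num in A:
--         d_sum = digit_sum(num)
--         max_sums[d_sum] = max(max_sums.get(d_sum, -1), num)
--
--     # single scan over qualifying digit sums: keep the best value seen so far
--     # and the best pair sum so far, instead of an all-pairs double loop
--     best = -1
--     m = None
--     for k in range(1, 100):
--         if k in max_sums:
--             v = max_sums[k]
--             if m is not None and (best == -1 or m + v > best):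
--                 best = m + v
--             if m is None or v > m:
--                 m = v
--     return best
-- ===== Notes on version B (the rewrite author's own statement) =====
-- stated objective: alternative
-- what changed: The 100x100 all-pairs double loop over digit-sum keys is replaced by a single prefix-max scan over the qualifying keys that maintains the best value and best pair sum seen so far (the first dict-building pass is kept).
import Mathlib
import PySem

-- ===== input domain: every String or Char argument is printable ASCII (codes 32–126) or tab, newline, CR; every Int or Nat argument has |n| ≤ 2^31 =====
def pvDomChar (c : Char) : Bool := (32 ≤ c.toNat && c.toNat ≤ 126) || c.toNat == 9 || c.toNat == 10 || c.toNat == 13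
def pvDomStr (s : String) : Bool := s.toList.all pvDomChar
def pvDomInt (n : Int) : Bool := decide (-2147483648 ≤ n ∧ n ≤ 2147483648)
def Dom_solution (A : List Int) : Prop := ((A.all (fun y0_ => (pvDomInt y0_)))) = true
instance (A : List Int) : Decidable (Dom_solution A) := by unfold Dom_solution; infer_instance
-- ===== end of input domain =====

-- B replaces A's 100×100 all-pairs loop over digit-sum keys by one prefix-max scan; same first pass.

-- ===== PORT A =====
-- digit_sum(num) = sum(int(digit) for digit in str(num)); int('-') raises ValueError (negative num),
-- so those inputs are excluded by Pre_solution and the `.getD 0` below is never taken inside Pre_.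
def digitSum (n : Int) : Int :=
  (PySem.Int.toChars n).foldl (fun a c => a + ((PySem.Int.ofStr? (String.ofList [c])).getD 0)) 0

-- the first pass (identical in A and in B's source): max value per digit sum
def buildMax (A : List Int) : PySem.Dict Int Int :=
  A.foldl (fun d num =>
    let k := digitSum num
    d.insert k (max (d.getD k (-1)) num)) PySem.Dict.empty

-- inner loop: for j in range(i+1,100): if j in max_sums: … max_sums[i]+max_sums[j]
-- (both subscripts are guarded by membership, so `.getD _ 0` is exact: no KeyError is reachable)
def innerA (d : PySem.Dict Int Int) (i : Int) (acc : Int) : Int :=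
  (PySem.List.pyRange (i+1) 100 1).foldl
    (fun a j => if d.contains j then max a (d.getD i 0 + d.getD j 0) else a) acc

def solution (A : List Int) : Int :=
  let d := buildMax A
  let m := (PySem.List.pyRange 1 100 1).foldl
    (fun acc i => if d.contains i then innerA d i acc else acc) 1
  if m ≠ 1 then m else -1

-- ===== PORT B =====
-- state (best, m): best pair sum so far (-1 = none yet), max qualifying value so far (None = none yet)
def solution_alt (A : List Int) : Int :=
  let d := buildMax A
  let st := (PySem.List.pyRange 1 100 1).foldl
    (fun (st : Int × Option Int) k =>
      match d.get? k with      -- `if k in max_sums: v = max_sums[k]`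
      | none => st
      | some v =>
        let best := st.1
        let best' := match st.2 with
          | some mv => if best == -1 || mv + v > best then mv + v else best
          | none => best
        let m' := match st.2 with
          | none => some v
          | some mv => if v > mv then some v else some mv
        (best', m')) (-1, none)
  st.1

-- ===== PRECONDITION & SPEC =====
-- A raises ValueError (int('-')) on any negative element; Pre_ admits exactly the lists of nonnegative ints.
def Pre_solution (A : List Int) : Prop := ∀ x ∈ A, 0 ≤ x
instance (A : List Int) : Decidable (Pre_solution A) := by unfold Pre_solution; infer_instance
def pvWitness_solution : List Int := [12, 7, 30]

def Spec_solution (A : List Int) (out : Int) : Prop := out = solution_alt A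
instance (A : List Int) (out : Int) : Decidable (Spec_solution A out) := by unfold Spec_solution; infer_instance

-- ===== CLAIM (what is proved, stated in full; the proofs are below) =====
def Claim_equal_solution : Prop := ∀ (A : List Int), Dom_solution A → Pre_solution A → Spec_solution A (solution A)

-- ===== LEMMAS AND PROOFS =====

-- the qualifying values d[a], d[a+1], …, a+n exclusive (fuel n)
def valsFrom (d : PySem.Dict Int Int) : Int → Nat → List Int
  | _, 0 => []
  | a, n+1 =>
    match d.get? a with
    | some v => v :: valsFrom d (a+1) n
    | none => valsFrom d (a+1) n

-- all pairwise sums (first element with each later element)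
def pairSums : List Int → List Int
  | [] => []
  | v :: t => t.map (v + ·) ++ pairSums t

-- B's scan step, dict already resolved
def stepV (st : Int × Option Int) (v : Int) : Int × Option Int :=
  let best := st.1
  let best' := match st.2 with
    | some mv => if best == -1 || mv + v > best then mv + v else best
    | none => best
  let m' := match st.2 with
    | none => some v
    | some mv => if v > mv then some v else some mv
  (best', m')

def mxOf (p : List Int) : Int := p.foldl max 0

def stateOf (p : List Int) : Int × Option Int :=
  ((pairSums p).foldl max (-1), if p.isEmpty then none else some (mxOf p))

lemma foldl_max_acc : ∀ (q : List Int) (c e : Int), q.foldl max (max c e) = max (q.foldl max c) e := by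
  intro q
  induction q with
  | nil => intro c e; rfl
  | cons x t ih =>
    intro c e
    simp only [List.foldl_cons]
    have h1 : max (max c e) x = max (max c x) e := by omega
    rw [h1, ih]

lemma le_foldl_max_init : ∀ (q : List Int) (c : Int), c ≤ q.foldl max c := by
  intro q
  induction q with
  | nil => intro c; exact le_refl c
  | cons x t ih =>
    intro c
    simp only [List.foldl_cons]
    exact le_trans (le_max_left c x) (ih _)

lemma foldl_max_ge : ∀ (q : List Int) (c x : Int), x ∈ q → x ≤ q.foldl max c := by
  intro q
  induction q with
  | nil => intro c x hx; simp at hx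
  | cons y t ih =>
    intro c x hx
    rcases List.mem_cons.mp hx with h | h
    · subst h
      simp only [List.foldl_cons]
      exact le_trans (le_max_right c x) (le_foldl_max_init t _)
    · simp only [List.foldl_cons]
      exact ih _ x h

lemma innerA_fold (d : PySem.Dict Int Int) (vi : Int) :
    ∀ (n : Nat) (a : Int), a + n = 100 → ∀ acc : Int,
      (PySem.List.pyRange a 100 1).foldl
          (fun ac j => if d.contains j then max ac (vi + d.getD j 0) else ac) acc
        = ((valsFrom d a n).map (vi + ·)).foldl max acc := by
  intro n
  induction n with
  | zero =>
    intro a ha acc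
    rw [PySem.List.pyRange_one_eq_nil (by omega)]
    rfl
  | succ n ih =>
    intro a ha acc
    rw [PySem.List.pyRange_one_cons (by omega)]
    simp only [List.foldl_cons]
    cases h : d.get? a with
    | none =>
      have hc : d.contains a = false := by
        rw [PySem.Dict.contains_eq_isSome_get?, h]; rfl
      simp only [hc, if_neg Bool.false_ne_true, valsFrom, h]
      exact ih (a+1) (by omega) acc
    | some v =>
      have hc : d.contains a = true := by
        rw [PySem.Dict.contains_eq_isSome_get?, h]; rfl
      have hg : d.getD a 0 = v := PySem.Dict.getD_of_get?_eq_some d 0 h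
      simp only [hc, hg, valsFrom, h, List.map_cons, List.foldl_cons]
      exact ih (a+1) (by omega) _

lemma outerA_fold (d : PySem.Dict Int Int) :
    ∀ (n : Nat) (a : Int), a + n = 100 → ∀ acc : Int,
      (PySem.List.pyRange a 100 1).foldl
          (fun acc i => if d.contains i then innerA d i acc else acc) acc
        = (pairSums (valsFrom d a n)).foldl max acc := by
  intro n
  induction n with
  | zero =>
    intro a ha acc
    rw [PySem.List.pyRange_one_eq_nil (by omega)]
    rfl
  | succ n ih =>
    intro a ha acc
    rw [PySem.List.pyRange_one_cons (by omega)]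
    simp only [List.foldl_cons]
    cases h : d.get? a with
    | none =>
      have hc : d.contains a = false := by
        rw [PySem.Dict.contains_eq_isSome_get?, h]; rfl
      simp only [hc, if_neg Bool.false_ne_true, valsFrom, h]
      exact ih (a+1) (by omega) acc
    | some v =>
      have hc : d.contains a = true := by
        rw [PySem.Dict.contains_eq_isSome_get?, h]; rfl
      have hg : d.getD a 0 = v := PySem.Dict.getD_of_get?_eq_some d 0 h
      simp only [hc, valsFrom, h, pairSums, List.foldl_append]
      rw [innerA, hg, innerA_fold d v n (a+1) (by omega) acc]
      exact ih (a+1) (by omega) _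

lemma altB_fold (d : PySem.Dict Int Int) :
    ∀ (n : Nat) (a : Int), a + n = 100 → ∀ st : Int × Option Int,
      (PySem.List.pyRange a 100 1).foldl
          (fun (st : Int × Option Int) k =>
            match d.get? k with
            | none => st
            | some v =>
              let best := st.1
              let best' := match st.2 with
                | some mv => if best == -1 || mv + v > best then mv + v else best
                | none => best
              let m' := match st.2 with
                | none => some v
                | some mv => if v > mv then some v else some mv
              (best', m')) st
        = (valsFrom d a n).foldl stepV st := by
  intro n
  induction n with
  | zero =>
    intro a ha st
    rw [PySem.List.pyRange_one_eq_nil (by omega)]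
    rfl
  | succ n ih =>
    intro a ha st
    rw [PySem.List.pyRange_one_cons (by omega)]
    simp only [List.foldl_cons]
    cases h : d.get? a with
    | none =>
      simp only [valsFrom, h]
      exact ih (a+1) (by omega) st
    | some v =>
      simp only [valsFrom, h, List.foldl_cons]
      exact ih (a+1) (by omega) _

lemma mxOf_ge_one (p : List Int) (hp : p ≠ []) (h1 : ∀ x ∈ p, 1 ≤ x) : 1 ≤ mxOf p := by
  cases p with
  | nil => exact absurd rfl hp
  | cons x t =>
    have hx : x ≤ mxOf (x :: t) := foldl_max_ge _ 0 x (List.mem_cons_self)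
    have := h1 x (List.mem_cons_self)
    omega

lemma mxOf_cons (x : Int) (t : List Int) : mxOf (x :: t) = max (mxOf t) x := by
  unfold mxOf
  simp only [List.foldl_cons]
  exact foldl_max_acc t 0 x

lemma pairSums_append (v : Int) :
    ∀ (p : List Int), (∀ x ∈ p, 0 ≤ x) → ∀ c : Int,
      (pairSums (p ++ [v])).foldl max c
        = max ((pairSums p).foldl max c) (if p.isEmpty then c else mxOf p + v) := by
  intro p
  induction p with
  | nil =>
    intro _ c
    simp only [List.nil_append, pairSums, List.map_nil, List.foldl_nil, List.isEmpty_nil, if_true]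
    omega
  | cons x t ih =>
    intro hp c
    have hx : 0 ≤ x := hp x (List.mem_cons_self)
    have ht : ∀ y ∈ t, 0 ≤ y := fun y hy => hp y (List.mem_cons_of_mem x hy)
    simp only [List.cons_append, pairSums, List.map_append, List.map_cons, List.map_nil,
      List.foldl_append, List.foldl_cons, List.foldl_nil, List.isEmpty_cons]
    rw [foldl_max_acc, ih ht]
    cases t with
    | nil =>
      simp only [pairSums, List.foldl_nil, List.isEmpty_nil, if_true, List.map_nil]
      rw [mxOf_cons x []]
      simp only [mxOf, List.foldl_nil]
      norm_num
      omega
    | cons y u =>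
      simp only [List.isEmpty_cons, if_neg Bool.false_ne_true]
      rw [mxOf_cons x (y :: u)]
      omega

lemma scan_stateOf :
    ∀ (t p : List Int), (∀ x ∈ p, 1 ≤ x) → (∀ x ∈ t, 1 ≤ x) →
      t.foldl stepV (stateOf p) = stateOf (p ++ t) := by
  intro t
  induction t with
  | nil => intro p _ _; simp
  | cons v t ih =>
    intro p hp ht
    have hv : 1 ≤ v := ht v (List.mem_cons_self)
    have hstep : stepV (stateOf p) v = stateOf (p ++ [v]) := by
      cases p with
      | nil =>
        have hmx : mxOf [v] = v := by
          simp only [mxOf, List.foldl_cons, List.foldl_nil]; omega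
        simp only [stateOf, pairSums, List.map_nil, List.nil_append, List.foldl_nil,
          List.isEmpty_nil, List.isEmpty_cons, if_true, stepV, hmx]
        simp
      | cons x u =>
        have hne : (x :: u) ≠ ([] : List Int) := by simp
        have h1 : 1 ≤ mxOf (x :: u) := mxOf_ge_one _ hne hp
        have h0 : ∀ y ∈ x :: u, 0 ≤ y := fun y hy => le_trans (by norm_num) (hp y hy)
        simp only [stateOf, List.isEmpty_cons, if_neg Bool.false_ne_true, stepV]
        rw [pairSums_append v (x :: u) h0 (-1)]
        simp only [List.isEmpty_cons, if_neg Bool.false_ne_true]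
        rw [Prod.mk.injEq]
        refine ⟨?_, ?_⟩
        · have hs : 2 ≤ mxOf (x :: u) + v := by omega
          by_cases hb : ((List.foldl max (-1) (pairSums (x :: u)) == -1)
              || decide (mxOf (x :: u) + v > List.foldl max (-1) (pairSums (x :: u)))) = true
          · rw [if_pos hb]
            simp only [Bool.or_eq_true, beq_iff_eq, decide_eq_true_eq] at hb
            rcases hb with hb | hb <;> omega
          · rw [if_neg hb]
            simp only [Bool.or_eq_true, beq_iff_eq, decide_eq_true_eq, not_or, not_lt] at hb
            omega
        · have hmm : mxOf ((x :: u) ++ [v]) = max (mxOf (x :: u)) v := by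
            unfold mxOf; rw [List.foldl_append]; simp only [List.foldl_cons, List.foldl_nil]
          simp only [List.cons_append, List.isEmpty_cons, if_neg Bool.false_ne_true]
          rw [← List.cons_append, hmm]
          split_ifs with h <;> simp only [Option.some.injEq] <;> omega
    rw [List.foldl_cons, hstep, ih (p ++ [v])
      (by intro x hx; rcases List.mem_append.mp hx with h | h
          · exact hp x h
          · rcases List.mem_singleton.mp h with rfl; exact hv)
      (fun x hx => ht x (List.mem_cons_of_mem v hx))]
    rw [List.append_assoc]
    rfl

lemma digitSum_zero : digitSum 0 = 0 := by decide

lemma build_inv_aux :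
    ∀ (A : List Int) (d : PySem.Dict Int Int), (∀ x ∈ A, 0 ≤ x) →
      (∀ k v, d.get? k = some v → digitSum v = k ∧ 0 ≤ v) →
      ∀ k v, (A.foldl (fun d num =>
          let k := digitSum num
          d.insert k (max (d.getD k (-1)) num)) d).get? k = some v →
        digitSum v = k ∧ 0 ≤ v := by
  intro A
  induction A with
  | nil => intro d _ hd k v h; exact hd k v h
  | cons num t ih =>
    intro d hA hd k v h
    simp only [List.foldl_cons] at h
    refine ih _ (fun x hx => hA x (List.mem_cons_of_mem num hx)) ?_ k v h
    intro k' v' h'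
    rw [PySem.Dict.get?_insert] at h'
    split_ifs at h' with hk
    · subst hk
      injection h' with h'
      have hnum : 0 ≤ num := hA num List.mem_cons_self
      cases hg : d.get? (digitSum num) with
      | some old =>
        rw [PySem.Dict.getD_of_get?_eq_some d (-1) hg] at h'
        rcases max_choice old num with hm | hm
        · rw [hm] at h'
          subst h'
          exact hd _ _ hg
        · rw [hm] at h'
          subst h'
          exact ⟨rfl, hnum⟩
      | none =>
        rw [PySem.Dict.getD_of_get?_eq_none d (-1) hg] at h'
        have hmx : max (-1 : Int) num = num := by omega
        rw [hmx] at h'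
        subst h'
        exact ⟨rfl, hnum⟩
    · exact hd k' v' h'

lemma valsFrom_ge_one (d : PySem.Dict Int Int)
    (hd : ∀ k v, d.get? k = some v → digitSum v = k ∧ 0 ≤ v) :
    ∀ (n : Nat) (a : Int), 1 ≤ a → ∀ v ∈ valsFrom d a n, 1 ≤ v := by
  intro n
  induction n with
  | zero => intro a _ v hv; simp [valsFrom] at hv
  | succ n ih =>
    intro a ha v hv
    unfold valsFrom at hv
    cases h : d.get? a with
    | none =>
      rw [h] at hv
      exact ih (a+1) (by omega) v hv
    | some w =>
      rw [h] at hv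
      rcases List.mem_cons.mp hv with rfl | hv'
      · obtain ⟨hds, hw⟩ := hd a v h
        rcases eq_or_lt_of_le hw with hw0 | hw1
        · exfalso
          rw [← hw0] at hds
          rw [digitSum_zero] at hds
          omega
        · omega
      · exact ih (a+1) (by omega) v hv'

lemma pairSums_ge_two :
    ∀ (L : List Int), (∀ x ∈ L, 1 ≤ x) → ∀ s ∈ pairSums L, 2 ≤ s := by
  intro L
  induction L with
  | nil => intro _ s hs; simp [pairSums] at hs
  | cons v t ih =>
    intro h s hs
    simp only [pairSums, List.mem_append, List.mem_map] at hs
    rcases hs with ⟨w, hw, rfl⟩ | hs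
    · have := h v List.mem_cons_self
      have := h w (List.mem_cons_of_mem v hw)
      omega
    · exact ih (fun x hx => h x (List.mem_cons_of_mem v hx)) s hs

-- ===== VERDICT (by name: the statement is the Claim_ definition above) =====
theorem solution_spec : Claim_equal_solution := by
  intro A _ hPre
  unfold Spec_solution
  have hd : ∀ k v, (buildMax A).get? k = some v → digitSum v = k ∧ 0 ≤ v := by
    refine build_inv_aux A PySem.Dict.empty hPre ?_
    intro k v h
    rw [PySem.Dict.get?_empty] at h
    exact absurd h (by simp)
  set d := buildMax A with hdset
  set L := valsFrom d 1 99 with hL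
  have h1 : ∀ v ∈ L, 1 ≤ v := valsFrom_ge_one d hd 99 1 (le_refl 1)
  have h2 : ∀ s ∈ pairSums L, 2 ≤ s := pairSums_ge_two L h1
  have hA : solution A = (if (pairSums L).foldl max 1 ≠ 1 then (pairSums L).foldl max 1 else -1) := by
    simp only [solution, ← hdset]
    rw [outerA_fold d 99 1 (by norm_num) 1]
  have hB : solution_alt A = (pairSums L).foldl max (-1) := by
    simp only [solution_alt, ← hdset]
    rw [altB_fold d 99 1 (by norm_num) ((-1 : Int), (none : Option Int))]
    have hinit : ((-1 : Int), (none : Option Int)) = stateOf [] := by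
      simp [stateOf, pairSums]
    rw [hinit, scan_stateOf L [] (by simp) h1]
    simp [stateOf]
  rw [hA, hB]
  have hMN : (pairSums L).foldl max 1 = max ((pairSums L).foldl max (-1)) 1 := by
    have h := foldl_max_acc (pairSums L) (-1) 1
    rw [show max (-1 : Int) 1 = 1 by norm_num] at h
    exact h
  cases hq : pairSums L with
  | nil =>
    simp only [hq, List.foldl_nil] at hMN ⊢
    norm_num
  | cons s rest =>
    have hs2 : 2 ≤ s := h2 s (hq ▸ List.mem_cons_self)
    have hsN : s ≤ (pairSums L).foldl max (-1) := foldl_max_ge _ (-1) s (hq ▸ List.mem_cons_self)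
    rw [hq] at hMN hsN
    split_ifs with h <;> omega
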